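-- pv_equiv track=rewrite | github.com/eliottcassidy2000/math | 04-computation/grinberg_stanley_UT_v2.py | format_partition
-- ===== SOURCE A (Python) =====
-- def format_partition(partition):
--     """Format partition as string like p_3*p_1^2."""
--     from collections import Counter
--     c = Counter(partition)
--     parts = []
--     for k in sorted(c.keys(), reverse=True):
--         if c[k] == 1:
--             parts.append(f"p_{k}")
--         else:
--             parts.append(f"p_{k}^{c[k]}")
--     return "*".join(parts)
-- ===== SOURCE B (Python) =====
-- def format_partition(partition):
--     """Format partition as string like p_3*p_1^2.
--
--     Single descending sort; multiplicities read off as run lengths of the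
--     sorted list with a manual run-length scan (no Counter/dict)."""
--     s = sorted(partition, reverse=True)
--     parts = []
--     i = 0
--     n = len(s)
--     while i < n:
--         j = i
--         while j < n and s[j] == s[i]:
--             j += 1
--         count = j - i
--         if count == 1:
--             parts.append(f"p_{s[i]}")
--         else:
--             parts.append(f"p_{s[i]}^{count}")
--         i = j
--     return "*".join(parts)
-- ===== Notes on version B (the rewrite author's own statement) =====
-- stated objective: alternative
-- what changed: Replaces Counter hash-tally plus sorting of the distinct keys with a single descending sort of the whole partition followed by a manual run-length scan, so each multiplicity is read off as the length of a consecutive run instead of a dict lookup.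
import Mathlib
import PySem

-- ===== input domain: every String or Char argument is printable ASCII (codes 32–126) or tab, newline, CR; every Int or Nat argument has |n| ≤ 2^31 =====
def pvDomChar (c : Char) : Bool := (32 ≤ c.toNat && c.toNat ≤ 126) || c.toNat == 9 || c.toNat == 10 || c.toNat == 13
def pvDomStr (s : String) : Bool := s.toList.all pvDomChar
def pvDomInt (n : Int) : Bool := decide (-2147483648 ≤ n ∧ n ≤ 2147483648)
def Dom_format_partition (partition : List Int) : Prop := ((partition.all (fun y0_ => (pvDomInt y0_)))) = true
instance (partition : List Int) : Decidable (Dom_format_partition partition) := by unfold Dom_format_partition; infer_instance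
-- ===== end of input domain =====

-- B replaces A's Counter-plus-sorted-keys with one descending sort and a run-length
-- scan of the sorted list (alternative decomposition, same asymptotic cost).

-- ===== PORT A =====
-- A: c = Counter(partition); for k in sorted(c.keys(), reverse=True): append p_k or p_k^c[k]; '*'.join
def format_partition (partition : List Int) : String :=
  let c := PySem.Dict.counter partition
  let parts := (PySem.List.sorted c.keys (fun x => x) true).foldl
    (fun acc k =>
      if c.getD k 0 == 1 then acc ++ ["p_" ++ PySem.Int.toStr k]
      else acc ++ ["p_" ++ PySem.Int.toStr k ++ "^" ++ PySem.Int.toStr (c.getD k 0)]) []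
  PySem.Str.join "*" parts

-- ===== PORT B =====
-- B's run-length scan: the inner `while s[j] == s[i]` is the takeWhile/dropWhile split,
-- the outer `while i < n` is the structural recursion on the remaining suffix.
def fpRuns : List Int → List String
  | [] => []
  | x :: xs =>
    let run := xs.takeWhile (fun y => y == x)
    let rest := xs.dropWhile (fun y => y == x)
    (if run.length + 1 == 1 then "p_" ++ PySem.Int.toStr x
     else "p_" ++ PySem.Int.toStr x ++ "^" ++ PySem.Int.toStr ((run.length : Int) + 1)) :: fpRuns rest
termination_by l => l.length
decreasing_by
  have := List.length_dropWhile_le (p := fun y => y == x) (l := xs)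
  simp at *; omega

def format_partition_alt (partition : List Int) : String :=
  PySem.Str.join "*" (fpRuns (PySem.List.sorted partition (fun x => x) true))

-- ===== PRECONDITION & SPEC =====
def Spec_format_partition (partition : List Int) (out : String) : Prop := out = format_partition_alt partition
instance (partition : List Int) (out : String) : Decidable (Spec_format_partition partition out) := by unfold Spec_format_partition; infer_instance

-- ===== CLAIM (what is proved, stated in full; the proofs are below) =====
def Claim_equal_format_partition : Prop := ∀ (partition : List Int), Dom_format_partition partition → Spec_format_partition partition (format_partition partition)

-- ===== LEMMAS AND PROOFS =====

-- the single formatting step both programs perform for a value k of multiplicity cnt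
def fmt (k cnt : Int) : String :=
  if cnt == 1 then "p_" ++ PySem.Int.toStr k
  else "p_" ++ PySem.Int.toStr k ++ "^" ++ PySem.Int.toStr cnt

-- folding Set.add over elements all equal to the already-present seed does nothing
lemma foldl_add_absorb (x : Int) (run : List Int) (h : ∀ y ∈ run, y = x) :
    run.foldl PySem.Set.add [x] = [x] := by
  induction run with
  | nil => rfl
  | cons a tl ih =>
    have ha : a = x := h a (by simp)
    simp [List.foldl, ha, PySem.Set.add, PySem.Set.contains]
    exact ih (fun y hy => h y (by simp [hy]))

lemma foldl_add_cons_not_mem (a : Int) (l : List Int) (h : a ∉ l) :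
    ∀ s : List Int, l.foldl PySem.Set.add (a :: s) = a :: l.foldl PySem.Set.add s := by
  induction l with
  | nil => intro s; rfl
  | cons y tl ih =>
    intro s
    have hya : y ≠ a := fun e => h (by simp [e])
    have h' : a ∉ tl := fun e => h (by simp [e])
    have hstep : PySem.Set.add (a :: s) y = a :: PySem.Set.add s y := by
      by_cases hc : y ∈ s
      · simp [PySem.Set.add, PySem.Set.contains, hc, hya]
      · simp [PySem.Set.add, PySem.Set.contains, hc, hya]
    rw [List.foldl_cons, List.foldl_cons, hstep]
    exact ih h' _

-- in a descending list every element surviving the leading x-run is < x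
lemma dropWhile_lt (x : Int) : ∀ xs : List Int, (∀ y ∈ xs, y ≤ x) →
    xs.Pairwise (fun a b => b ≤ a) →
    ∀ y ∈ xs.dropWhile (fun y => y == x), y < x := by
  intro xs
  induction xs with
  | nil => intro _ _ y hy; simp [List.dropWhile] at hy
  | cons a tl ih =>
    intro hle hp y hy
    by_cases ha : a = x
    · rw [List.dropWhile_cons_of_pos (by simp [ha])] at hy
      exact ih (fun z hz => hle z (by simp [hz])) hp.of_cons y hy
    · rw [List.dropWhile_cons_of_neg (by simp [ha])] at hy
      rcases List.mem_cons.mp hy with rfl | hytl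
      · exact lt_of_le_of_ne (hle y (by simp)) ha
      · calc y ≤ a := (List.pairwise_cons.mp hp).1 y hytl
             _ < x := lt_of_le_of_ne (hle a (by simp)) ha

-- the run/rest decomposition facts for a descending-sorted cons
lemma key_decomp (x : Int) (xs : List Int)
    (h : (x :: xs).Pairwise (fun a b => b ≤ a)) :
    PySem.Set.ofList (x :: xs) = x :: PySem.Set.ofList (xs.dropWhile (fun y => y == x)) ∧
    (x :: xs).count x = (xs.takeWhile (fun y => y == x)).length + 1 ∧
    (∀ y ∈ xs.dropWhile (fun y => y == x), y < x) ∧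
    (xs.dropWhile (fun y => y == x)).Pairwise (fun a b => b ≤ a) := by
  obtain ⟨hle, hp⟩ := List.pairwise_cons.mp h
  have hrun : ∀ y ∈ xs.takeWhile (fun y => y == x), y = x := by
    intro y hy; simpa using List.mem_takeWhile_imp hy
  have hlt := dropWhile_lt x xs hle hp
  have hnot : x ∉ xs.dropWhile (fun y => y == x) := fun hm => absurd (hlt x hm) (lt_irrefl x)
  refine ⟨?_, ?_, hlt, hp.sublist (List.dropWhile_sublist _)⟩
  · rw [PySem.Set.ofList_eq_foldl, PySem.Set.ofList_eq_foldl]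
    rw [show List.foldl PySem.Set.add [] (x :: xs) =
        List.foldl PySem.Set.add [x] xs by rfl]
    conv_lhs => rw [← List.takeWhile_append_dropWhile (p := fun y => y == x) (l := xs)]
    rw [List.foldl_append, foldl_add_absorb x _ hrun,
        foldl_add_cons_not_mem x _ hnot]
  · rw [List.count_cons_self]
    conv_lhs => rw [← List.takeWhile_append_dropWhile (p := fun y => y == x) (l := xs)]
    rw [List.count_append]
    have h1 : (xs.takeWhile (fun y => y == x)).count x
        = (xs.takeWhile (fun y => y == x)).length :=
      List.count_eq_length.mpr (fun b hb => (hrun b hb).symm)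
    have h2 : (xs.dropWhile (fun y => y == x)).count x = 0 :=
      List.count_eq_zero.mpr hnot
    omega

-- the distinct elements of a descending list, in first-occurrence order, decrease strictly
lemma ofList_pairwise_gt : ∀ t : List Int, t.Pairwise (fun a b => b ≤ a) →
    (PySem.Set.ofList t).Pairwise (fun a b => b < a) := by
  intro t
  induction t using fpRuns.induct with
  | case1 => intro _; simp [PySem.Set.ofList]
  | case2 x xs rest ih =>
    intro h
    obtain ⟨hset, _, hlt, hp⟩ := key_decomp x xs h
    rw [hset]
    exact List.pairwise_cons.mpr
      ⟨fun y hy => hlt y ((PySem.Set.mem_ofList _ y).mp hy), ih hp⟩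

-- B's run-length scan of a descending list formats (distinct value, multiplicity) pairs
lemma fpRuns_eq : ∀ t : List Int, t.Pairwise (fun a b => b ≤ a) →
    fpRuns t = (PySem.Set.ofList t).map (fun k => fmt k ((t.count k : Int))) := by
  intro t
  induction t using fpRuns.induct with
  | case1 => intro _; simp [fpRuns, PySem.Set.ofList]
  | case2 x xs rest ih =>
    intro h
    obtain ⟨hset, hcnt, hlt, hp⟩ := key_decomp x xs h
    rw [fpRuns, hset, List.map_cons]
    congr 1
    · rw [hcnt]
      unfold fmt
      by_cases h0 : (xs.takeWhile (fun y => y == x)).length = 0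
      · simp [h0]
      · simp only [beq_iff_eq]
        rw [if_neg (by omega), if_neg (by push_cast; omega)]
        push_cast
        ring_nf
    · rw [ih hp]
      apply List.map_congr_left
      intro k hk
      have hkr : k ∈ xs.dropWhile (fun y => y == x) := (PySem.Set.mem_ofList _ k).mp hk
      have hkx : k ≠ x := ne_of_lt (hlt k hkr)
      congr 1
      symm
      have h0 : (xs.takeWhile (fun y => y == x)).count k = 0 :=
        List.count_eq_zero.mpr (fun hm => hkx (by simpa using List.mem_takeWhile_imp hm))
      have hdecomp : List.count k xs = List.count k (List.dropWhile (fun y => y == x) xs) := by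
        conv_lhs => rw [← List.takeWhile_append_dropWhile (p := fun y => y == x) (l := xs)]
        rw [List.count_append, h0, Nat.zero_add]
      simp [Ne.symm hkx, hdecomp]
      rfl

lemma ports_agree (partition : List Int) :
    format_partition partition = format_partition_alt partition := by
  have ht : (PySem.List.sorted partition (fun x => x) true).Pairwise (fun a b => b ≤ a) :=
    PySem.List.sorted_pairwise_rev partition (fun x => x)
  have hperm := PySem.List.sorted_perm partition (fun x => x) true
  have hsorted : PySem.List.sorted (PySem.Set.ofList partition) (fun x => x) true
      = PySem.Set.ofList (PySem.List.sorted partition (fun x => x) true) := by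
    apply PySem.List.sorted_rev_eq_of_perm_of_pairwise_gt
    · refine (List.perm_ext_iff_of_nodup (PySem.Set.nodup_ofList _) (PySem.Set.nodup_ofList _)).mpr ?_
      intro a
      rw [PySem.Set.mem_ofList, PySem.Set.mem_ofList]
      exact ⟨fun hm => hperm.mem_iff.mp hm, fun hm => hperm.mem_iff.mpr hm⟩
    · exact ofList_pairwise_gt _ ht
  simp only [format_partition, format_partition_alt]
  rw [fpRuns_eq _ ht, PySem.Dict.keys_counter, hsorted]
  have hfn : (fun (acc : List String) k =>
      if (PySem.Dict.counter partition).getD k 0 == 1 then acc ++ ["p_" ++ PySem.Int.toStr k]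
      else acc ++ ["p_" ++ PySem.Int.toStr k ++ "^" ++ PySem.Int.toStr ((PySem.Dict.counter partition).getD k 0)])
      = fun acc k => acc ++ [fmt k ((partition.count k : Int))] := by
    funext acc k
    rw [PySem.Dict.getD_counter]
    unfold fmt
    by_cases hc : ((partition.count k : Int) = 1) <;> simp [hc]
  rw [hfn, PySem.List.foldl_append_singleton_eq_map]
  simp only [List.nil_append]
  congr 1
  apply List.map_congr_left
  intro k _
  congr 1
  exact_mod_cast (hperm.count_eq k).symm

-- ===== VERDICT (by name: the statement is the Claim_ definition above) =====
theorem format_partition_spec : Claim_equal_format_partition := by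
  intro partition _
  unfold Spec_format_partition
  exact (ports_agree partition)
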